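-- pv_equiv track=rewrite | github.com/LauraHPG/Rosalind | computingGCContent.py | computeGCContent
-- ===== SOURCE A (Python) =====
-- def computeGCContent(dnaString):
--     res = 0
--     total = 0
--     for char in dnaString:
--         if char == 'C' or char == 'G':
--             res += 1
--             total += 1
--         elif char =='T' or char == 'A':
--             total += 1
--
--     return res, total
-- ===== SOURCE B (Python) =====
-- def computeGCContent(dnaString):
--     freq = {}
--     for ch in dnaString:
--         freq[ch] = freq.get(ch, 0) + 1
--     res = freq.get('G', 0) + freq.get('C', 0)
--     total = res + freq.get('A', 0) + freq.get('T', 0)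
--     return res, total
-- ===== Notes on version B (the rewrite author's own statement) =====
-- stated objective: idiomatic
-- what changed: Replaces the per-character branching loop with a frequency table built in one unconditional pass, reading the four nucleotide counts afterwards.
import Mathlib
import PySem

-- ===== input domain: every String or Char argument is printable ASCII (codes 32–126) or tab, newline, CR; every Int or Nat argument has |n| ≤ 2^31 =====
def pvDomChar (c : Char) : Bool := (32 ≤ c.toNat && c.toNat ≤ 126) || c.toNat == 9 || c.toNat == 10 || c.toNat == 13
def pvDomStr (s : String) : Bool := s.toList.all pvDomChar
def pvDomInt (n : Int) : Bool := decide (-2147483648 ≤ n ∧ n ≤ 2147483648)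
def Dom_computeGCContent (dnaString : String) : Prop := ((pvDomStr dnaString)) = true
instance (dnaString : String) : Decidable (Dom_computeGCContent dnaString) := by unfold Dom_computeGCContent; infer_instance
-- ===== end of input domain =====

-- B builds a frequency table in one pass and reads the four nucleotide counts, replacing A's per-character branching loop (idiomatic; same cost).

-- ===== PORT A =====
def computeGCContent (dnaString : String) : Int × Int :=
  dnaString.toList.foldl
    (fun (st : Int × Int) c =>
      if c = 'C' ∨ c = 'G' then (st.1 + 1, st.2 + 1)
      else if c = 'T' ∨ c = 'A' then (st.1, st.2 + 1)
      else st)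
    (0, 0)

-- ===== PORT B =====
def computeGCContent_alt (dnaString : String) : Int × Int :=
  let freq : PySem.Dict Char Int :=
    dnaString.toList.foldl (fun d ch => d.insert ch (d.getD ch 0 + 1)) PySem.Dict.empty
  let res := freq.getD 'G' 0 + freq.getD 'C' 0
  let total := res + freq.getD 'A' 0 + freq.getD 'T' 0
  (res, total)

-- ===== PRECONDITION & SPEC =====
def Spec_computeGCContent (dnaString : String) (out : Int × Int) : Prop := out = computeGCContent_alt dnaString
instance (dnaString : String) (out : Int × Int) : Decidable (Spec_computeGCContent dnaString out) := by unfold Spec_computeGCContent; infer_instance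

-- ===== CLAIM (what is proved, stated in full; the proofs are below) =====
def Claim_equal_computeGCContent : Prop := ∀ (dnaString : String), Dom_computeGCContent dnaString → Spec_computeGCContent dnaString (computeGCContent dnaString)

-- ===== LEMMAS AND PROOFS =====

theorem computeGCContent_foldl_eq (cs : List Char) (r t : Int) :
    cs.foldl
      (fun (st : Int × Int) c =>
        if c = 'C' ∨ c = 'G' then (st.1 + 1, st.2 + 1)
        else if c = 'T' ∨ c = 'A' then (st.1, st.2 + 1)
        else st)
      (r, t)
    = (r + cs.count 'C' + cs.count 'G',
       t + cs.count 'C' + cs.count 'G' + cs.count 'T' + cs.count 'A') := by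
  induction cs generalizing r t with
  | nil => simp
  | cons c cs ih =>
    simp only [List.foldl_cons, List.count_cons]
    by_cases hC : c = 'C'
    · subst hC; rw [if_pos (Or.inl rfl), ih]; refine Prod.ext ?_ ?_ <;> simp <;> ring
    · by_cases hG : c = 'G'
      · subst hG; rw [if_pos (Or.inr rfl), ih]; refine Prod.ext ?_ ?_ <;> simp <;> ring
      · rw [if_neg (by simp [hC, hG])]
        by_cases hT : c = 'T'
        · subst hT; rw [if_pos (Or.inl rfl), ih]; refine Prod.ext ?_ ?_ <;> simp <;> ring
        · by_cases hA : c = 'A'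
          · subst hA; rw [if_pos (Or.inr rfl), ih]; refine Prod.ext ?_ ?_ <;> simp <;> ring
          · rw [if_neg (by simp [hT, hA]), ih]; simp [hC, hG, hT, hA]

theorem computeGCContent_alt_eq (dnaString : String) :
    computeGCContent_alt dnaString
    = ((dnaString.toList.count 'G' : Int) + dnaString.toList.count 'C',
       (dnaString.toList.count 'G' : Int) + dnaString.toList.count 'C'
         + dnaString.toList.count 'A' + dnaString.toList.count 'T') := by
  simp [computeGCContent_alt, PySem.Dict.getD_foldl_insert_add_one]

-- ===== VERDICT (by name: the statement is the Claim_ definition above) =====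
theorem computeGCContent_spec : Claim_equal_computeGCContent := by
  intro s _
  unfold Spec_computeGCContent
  rw [computeGCContent_alt_eq, computeGCContent, computeGCContent_foldl_eq]
  refine Prod.ext ?_ ?_ <;> simp <;> ring
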